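-- pv_equiv track=rewrite | github.com/Aristylux/ktldoc | src/generate.py | splitAtLength
-- ===== SOURCE A (Python) =====
-- def splitAtLength(string: str, maxlen: int =100) -> tuple[str, str]:
--     words = string.split(', ')
--     part1 = []
--     part2 = []
--     current_length = 0
--     on_part2 = False
--
--     for word in words:
--         # Check if adding the current word exceeds the maximum length
--         if current_length + len(word) + 1 <= maxlen and not on_part2:
--             # Add the word and the comma to the result
--             part1.append(word)
--             current_length += len(word) + 1
--         else:
--             on_part2 = True
--             # Add the word at the part2
--             part2.append(word)
--
--     # Join the result list into a string using ', ' as the separator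
--     formatted_part1 = ', '.join(part1)
--     if len(part1) > 1 and len(part2) > 0:
--         formatted_part1 += ","
--     formatted_part2 = ', '.join(part2)
--
--     return formatted_part1, formatted_part2
-- ===== SOURCE B (Python) =====
-- def splitAtLength(string: str, maxlen: int = 100) -> tuple[str, str]:
--     # The running budget of A is the strictly increasing prefix-sum sequence
--     # S[i] = sum of (len(word)+1) over the first i+1 words, so the split point is
--     # simply the number of prefix sums <= maxlen: build the prefix sums, then
--     # binary-search for that boundary instead of threading a flag through a scan.
--     words = string.split(', ')
--     prefix = []
--     total = 0
--     for w in words: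
--         total += len(w) + 1
--         prefix.append(total)
--     lo, hi = 0, len(words)
--     while lo < hi:
--         mid = (lo + hi) // 2
--         if prefix[mid] <= maxlen:
--             lo = mid + 1
--         else:
--             hi = mid
--     part1, part2 = words[:lo], words[lo:]
--     formatted_part1 = ', '.join(part1)
--     if lo > 1 and part2:
--         formatted_part1 += ","
--     return formatted_part1, ', '.join(part2)
-- ===== Notes on version B (the rewrite author's own statement) =====
-- stated objective: alternative
-- what changed: Replaces the flag-threaded greedy scan by a staged algorithm: one pass builds the strictly increasing prefix sums of (len(word)+1), then a binary search over that monotone sequence locates the split index, and the parts are slices.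
import Mathlib
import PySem

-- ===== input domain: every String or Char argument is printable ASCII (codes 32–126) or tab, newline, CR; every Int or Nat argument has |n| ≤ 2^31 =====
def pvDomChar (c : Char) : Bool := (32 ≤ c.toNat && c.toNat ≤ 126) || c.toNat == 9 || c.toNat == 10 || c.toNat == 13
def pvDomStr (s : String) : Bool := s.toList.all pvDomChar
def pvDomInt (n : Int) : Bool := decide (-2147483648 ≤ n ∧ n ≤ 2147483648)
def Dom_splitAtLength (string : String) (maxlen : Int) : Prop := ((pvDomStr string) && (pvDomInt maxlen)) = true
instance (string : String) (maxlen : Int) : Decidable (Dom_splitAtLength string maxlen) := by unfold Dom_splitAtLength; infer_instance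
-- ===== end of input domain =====

-- B replaces A's flag-threaded two-accumulator loop by prefix sums + binary search over the monotone sums (alternative, same cost).


-- ===== PORT A =====
-- the for-loop of A: state (part1, part2, current_length, on_part2)
def splitAtLengthLoop (maxlen : Int) : List String → List String → List String → Int → Bool → List String × List String
  | [], part1, part2, _, _ => (part1, part2)
  | w :: ws, part1, part2, cl, on2 =>
    if cl + (PySem.Str.len w : Int) + 1 ≤ maxlen ∧ on2 = false then
      splitAtLengthLoop maxlen ws (part1 ++ [w]) part2 (cl + (PySem.Str.len w : Int) + 1) on2
    else
      splitAtLengthLoop maxlen ws part1 (part2 ++ [w]) cl true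

def splitAtLength (string : String) (maxlen : Int) : String × String :=
  let words := (PySem.Str.split? string ", ").getD []
  let r := splitAtLengthLoop maxlen words [] [] 0 false
  let formatted_part1 := PySem.Str.join ", " r.1
  let formatted_part1 :=
    if r.1.length > 1 ∧ r.2.length > 0 then PySem.Str.join "" [formatted_part1, ","]
    else formatted_part1
  let formatted_part2 := PySem.Str.join ", " r.2
  (formatted_part1, formatted_part2)

-- ===== PORT B =====
-- B's first pass: prefix sums of len(word)+1
def prefixSumsB : List String → Int → List Int
  | [], _ => []
  | w :: ws, total =>
    (total + (PySem.Str.len w : Int) + 1) :: prefixSumsB ws (total + (PySem.Str.len w : Int) + 1)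

-- B's while loop: binary search; prefix[mid] is always in range (mid < hi ≤ length),
-- so the Python indexing never raises and getD is exact here. The fuel argument is
-- only a totality guard (hi - lo shrinks each step, and fuel starts ≥ hi - lo).
def bisectB (pre : List Int) (maxlen : Int) : Nat → Nat → Nat → Nat
  | 0, lo, _ => lo
  | fuel + 1, lo, hi =>
    if lo < hi then
      let mid := (lo + hi) / 2
      if pre.getD mid 0 ≤ maxlen then bisectB pre maxlen fuel (mid + 1) hi
      else bisectB pre maxlen fuel lo mid
    else lo

def splitAtLength_alt (string : String) (maxlen : Int) : String × String :=
  let words := (PySem.Str.split? string ", ").getD []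
  let pre := prefixSumsB words 0
  let lo := bisectB pre maxlen words.length 0 words.length
  let part2 := words.drop lo
  let formatted_part1 := PySem.Str.join ", " (words.take lo)
  let formatted_part1 :=
    if lo > 1 ∧ part2 ≠ [] then PySem.Str.join "" [formatted_part1, ","]
    else formatted_part1
  (formatted_part1, PySem.Str.join ", " part2)

-- ===== PRECONDITION & SPEC =====
def Spec_splitAtLength (string : String) (maxlen : Int) (out : String × String) : Prop := out = splitAtLength_alt string maxlen
instance (string : String) (maxlen : Int) (out : String × String) : Decidable (Spec_splitAtLength string maxlen out) := by unfold Spec_splitAtLength; infer_instance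

-- ===== CLAIM (what is proved, stated in full; the proofs are below) =====
def Claim_equal_splitAtLength : Prop := ∀ (string : String) (maxlen : Int), Dom_splitAtLength string maxlen → Spec_splitAtLength string maxlen (splitAtLength string maxlen)

-- ===== LEMMAS AND PROOFS =====

-- boundary of A's greedy loop, used only to characterise both programs
def splitBoundary (maxlen : Int) : List String → Int → Nat
  | [], _ => 0
  | w :: ws, total =>
    if total + (PySem.Str.len w : Int) + 1 ≤ maxlen then
      splitBoundary maxlen ws (total + (PySem.Str.len w : Int) + 1) + 1
    else 0

theorem loop_on2_true (maxlen : Int) (ws : List String) : ∀ p1 p2 cl,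
    splitAtLengthLoop maxlen ws p1 p2 cl true = (p1, p2 ++ ws) := by
  induction ws with
  | nil => intro p1 p2 cl; simp [splitAtLengthLoop]
  | cons w ws ih =>
    intro p1 p2 cl
    simp only [splitAtLengthLoop]
    rw [if_neg (by simp)]
    rw [ih]
    simp

theorem splitBoundary_le (maxlen : Int) (ws : List String) : ∀ cl,
    splitBoundary maxlen ws cl ≤ ws.length := by
  induction ws with
  | nil => intro cl; simp [splitBoundary]
  | cons w ws ih =>
    intro cl
    simp only [splitBoundary]
    split
    · simpa using ih _
    · simp

theorem loop_on2_false (maxlen : Int) (ws : List String) : ∀ p1 p2 cl,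
    splitAtLengthLoop maxlen ws p1 p2 cl false =
      (p1 ++ ws.take (splitBoundary maxlen ws cl), p2 ++ ws.drop (splitBoundary maxlen ws cl)) := by
  induction ws with
  | nil => intro p1 p2 cl; simp [splitAtLengthLoop, splitBoundary]
  | cons w ws ih =>
    intro p1 p2 cl
    by_cases h : cl + (w.length : Int) < maxlen
    · simp [splitAtLengthLoop, splitBoundary, h, ih]
    · simp [splitAtLengthLoop, splitBoundary, h, loop_on2_true]

theorem prefixSumsB_length (ws : List String) : ∀ t, (prefixSumsB ws t).length = ws.length := by
  induction ws with
  | nil => intro t; simp [prefixSumsB]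
  | cons w ws ih => intro t; simp [prefixSumsB, ih]

-- every element of prefixSumsB ws t is ≥ t
theorem prefixSumsB_lb (ws : List String) : ∀ t k, k < ws.length → t ≤ (prefixSumsB ws t).getD k 0 := by
  induction ws with
  | nil => intro t k h; simp at h
  | cons w ws ih =>
    intro t k h
    cases k with
    | zero =>
      simp only [prefixSumsB, List.getD_cons_zero]
      have h0 : (0:Int) ≤ (PySem.Str.len w : Int) := Int.natCast_nonneg _
      omega
    | succ k =>
      have := ih (t + (PySem.Str.len w : Int) + 1) k (by simpa using h)
      simp only [prefixSumsB, List.getD_cons_succ]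
      have h0 : (0:Int) ≤ (PySem.Str.len w : Int) := Int.natCast_nonneg _
      omega

theorem prefixSumsB_mono (ws : List String) : ∀ t j k, j ≤ k → k < ws.length →
    (prefixSumsB ws t).getD j 0 ≤ (prefixSumsB ws t).getD k 0 := by
  induction ws with
  | nil => intro t j k hjk h; simp at h
  | cons w ws ih =>
    intro t j k hjk h
    cases k with
    | zero => interval_cases j; rfl
    | succ k =>
      cases j with
      | zero =>
        simp only [prefixSumsB, List.getD_cons_zero, List.getD_cons_succ]
        exact prefixSumsB_lb ws _ k (by simpa using h)
      | succ j =>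
        simp only [prefixSumsB, List.getD_cons_succ]
        exact ih _ j k (by omega) (by simpa using h)

-- characterisation of the split index
def SplitIdx (pre : List Int) (maxlen : Int) (i : Nat) : Prop :=
  i ≤ pre.length ∧ (∀ j, j < i → pre.getD j 0 ≤ maxlen) ∧ (i < pre.length → maxlen < pre.getD i 0)

theorem splitIdx_unique {pre : List Int} {maxlen : Int} {i i' : Nat}
    (h : SplitIdx pre maxlen i) (h' : SplitIdx pre maxlen i') : i = i' := by
  obtain ⟨hl, ha, hb⟩ := h
  obtain ⟨hl', ha', hb'⟩ := h'
  by_contra hne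
  rcases Nat.lt_or_ge i i' with hlt | hge
  · have := ha' i hlt
    have := hb (by omega)
    omega
  · have hlt : i' < i := by omega
    have := ha i' hlt
    have := hb' (by omega)
    omega

theorem splitBoundary_splitIdx (maxlen : Int) (ws : List String) : ∀ t,
    SplitIdx (prefixSumsB ws t) maxlen (splitBoundary maxlen ws t) := by
  induction ws with
  | nil => intro t; exact ⟨by simp [splitBoundary, prefixSumsB], by simp [splitBoundary], by simp [prefixSumsB]⟩
  | cons w ws ih =>
    intro t
    by_cases h : t + (PySem.Str.len w : Int) + 1 ≤ maxlen
    · obtain ⟨hl, ha, hb⟩ := ih (t + (PySem.Str.len w : Int) + 1)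
      refine ⟨?_, ?_, ?_⟩
      · simp only [splitBoundary, prefixSumsB, if_pos h, List.length_cons]
        rw [prefixSumsB_length] at hl ⊢
        omega
      · intro j hj
        simp only [splitBoundary, if_pos h] at hj
        cases j with
        | zero => simpa [prefixSumsB] using h
        | succ j => simpa [prefixSumsB] using ha j (by omega)
      · intro hlt
        simp only [splitBoundary, if_pos h] at hlt ⊢
        simp only [prefixSumsB, List.length_cons] at hlt ⊢
        simpa using hb (by omega)
    · refine ⟨?_, ?_, ?_⟩
      · simp only [splitBoundary]; rw [if_neg h]; simp
      · simp only [splitBoundary]; rw [if_neg h]; intro j hj; omega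
      · intro _
        simp only [splitBoundary]; rw [if_neg h]
        simp only [prefixSumsB, List.getD_cons_zero]
        omega

theorem bisectB_splitIdx (pre : List Int) (maxlen : Int)
    (hmono : ∀ j k, j ≤ k → k < pre.length → pre.getD j 0 ≤ pre.getD k 0) :
    ∀ n lo hi, hi - lo ≤ n → lo ≤ hi → hi ≤ pre.length →
    (∀ j, j < lo → pre.getD j 0 ≤ maxlen) →
    (∀ j, hi ≤ j → j < pre.length → maxlen < pre.getD j 0) →
    SplitIdx pre maxlen (bisectB pre maxlen n lo hi) := by
  intro n
  induction n with
  | zero =>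
    intro lo hi hn hlohi hhi hlow hhigh
    have : lo = hi := by omega
    subst this
    simp only [bisectB]
    exact ⟨by omega, hlow, fun h => hhigh lo (by omega) h⟩
  | succ n ih =>
    intro lo hi hn hlohi hhi hlow hhigh
    by_cases hlt : lo < hi
    · rw [bisectB, if_pos hlt]
      simp only
      by_cases hm : pre.getD ((lo + hi) / 2) 0 ≤ maxlen
      · rw [if_pos hm]
        refine ih _ _ (by omega) (by omega) hhi ?_ hhigh
        intro j hj
        exact le_trans (hmono j ((lo + hi) / 2) (by omega) (by omega)) hm
      · rw [if_neg hm]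
        refine ih _ _ (by omega) (by omega) (by omega) hlow ?_
        intro j hj hjl
        exact lt_of_lt_of_le (by omega) (hmono ((lo + hi) / 2) j hj hjl)
    · rw [bisectB, if_neg hlt]
      have : lo = hi := by omega
      subst this
      exact ⟨by omega, hlow, fun h => hhigh lo (by omega) h⟩

theorem bisectB_eq_splitBoundary (maxlen : Int) (ws : List String) :
    bisectB (prefixSumsB ws 0) maxlen ws.length 0 ws.length = splitBoundary maxlen ws 0 := by
  have h1 := bisectB_splitIdx (prefixSumsB ws 0) maxlen
    (fun j k hjk hk => prefixSumsB_mono ws 0 j k hjk (by rwa [prefixSumsB_length] at hk))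
    ws.length 0 ws.length (by omega) (by omega) (by rw [prefixSumsB_length])
    (by omega) (fun j hj hjl => absurd hjl (by rw [prefixSumsB_length]; omega))
  exact splitIdx_unique h1 (splitBoundary_splitIdx maxlen ws 0)

-- ===== VERDICT (by name: the statement is the Claim_ definition above) =====
theorem splitAtLength_spec : Claim_equal_splitAtLength := by
  intro string maxlen _
  unfold Spec_splitAtLength splitAtLength splitAtLength_alt
  simp only [loop_on2_false, List.nil_append, bisectB_eq_splitBoundary]
  have hle := splitBoundary_le maxlen ((PySem.Str.split? string ", ").getD []) 0
  have h1 : (((PySem.Str.split? string ", ").getD []).take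
      (splitBoundary maxlen ((PySem.Str.split? string ", ").getD []) 0)).length =
      splitBoundary maxlen ((PySem.Str.split? string ", ").getD []) 0 := by
    rw [List.length_take]; omega
  simp only [h1, gt_iff_lt, List.length_pos_iff]
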